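-- pv_equiv track=rewrite | github.com/gabrieldorosh/QR-Code-Generator | masking.py | penalty_rule1
-- ===== SOURCE A (Python) =====
-- def penalty_rule1(matrix: list[list[int]]) -> int:
--     size = len(matrix)
--     penalty = 0
--
--     # rows
--     for r in range(size):
--         run_color = matrix[r][0]
--         run_length = 1
--         for c in range(1, size):
--             if matrix[r][c] == run_color:
--                 run_length += 1
--             else:
--                 if run_length >= 5:
--                     penalty += 3 + (run_length - 5)
--                 run_color = matrix[r][c]
--                 run_length = 1
--         if run_length >= 5:
--             penalty += 3 + (run_length - 5)
--
--     # columns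
--     for c in range(size):
--         run_color = matrix[0][c]
--         run_length = 1
--         for r in range(1, size):
--             if matrix[r][c] == run_color:
--                 run_length += 1
--             else:
--                 if run_length >= 5:
--                     penalty += 3 + (run_length - 5)
--                 run_color = matrix[r][c]
--                 run_length = 1
--         if run_length >= 5:
--             penalty += 3 + (run_length - 5)
--
--     return penalty
-- ===== SOURCE B (Python) =====
-- def penalty_rule1(matrix: list[list[int]]) -> int:
--     n = len(matrix)
--
--     def line_penalty(seq):
--         total = 0
--         while seq:
--             k = 1
--             while k < len(seq) and seq[k] == seq[0]:
--                 k += 1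
--             if k >= 5:
--                 total += k - 2
--             seq = seq[k:]
--         return total
--
--     cols = [[matrix[r][c] for r in range(n)] for c in range(n)]
--     return sum(line_penalty(row[:n]) for row in matrix) + sum(line_penalty(col) for col in cols)
-- ===== Notes on version B (the rewrite author's own statement) =====
-- stated objective: simpler
-- what changed: Replaces the two duplicated run_color/run_length state machines over swapped index loops by one shared line_penalty helper that decomposes a line run by run (leading-run length, then the rest), applied to each row and to each explicitly built column; uses the identity 3+(L-5)=L-2.
import Mathlib
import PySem

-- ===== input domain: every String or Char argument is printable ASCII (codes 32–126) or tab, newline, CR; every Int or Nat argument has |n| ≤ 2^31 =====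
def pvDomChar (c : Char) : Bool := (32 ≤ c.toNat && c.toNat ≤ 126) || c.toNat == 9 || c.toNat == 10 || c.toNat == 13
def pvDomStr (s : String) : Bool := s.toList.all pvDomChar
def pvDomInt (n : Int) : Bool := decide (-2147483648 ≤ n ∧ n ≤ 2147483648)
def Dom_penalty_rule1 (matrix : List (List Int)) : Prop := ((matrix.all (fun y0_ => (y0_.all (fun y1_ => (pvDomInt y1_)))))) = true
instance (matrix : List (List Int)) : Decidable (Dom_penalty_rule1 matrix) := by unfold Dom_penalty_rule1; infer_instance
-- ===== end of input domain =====

-- B replaces A's duplicated row/column run_color/run_length state machines by one shared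
-- run-decomposition helper applied to each row and each explicitly built column (objective: simpler).


-- ===== PORT A =====
-- literal transliteration of A: two index-driven scans (rows, then columns), each keeping
-- (run_color, run_length, penalty) as fold state; matrix[r][c] is pyGetD (in range under Pre_).
def penalty_rule1 (matrix : List (List Int)) : Int :=
  let size : Int := PySem.List.len matrix
  let penalty : Int := 0
  -- rows
  let penalty :=
    (PySem.List.pyRange 0 size).foldl (fun pen r =>
      let st :=
        (PySem.List.pyRange 1 size).foldl (fun (s : Int × Int × Int) c =>
          if PySem.List.pyGetD (PySem.List.pyGetD matrix r []) c 0 = s.1 then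
            (s.1, s.2.1 + 1, s.2.2)
          else
            (PySem.List.pyGetD (PySem.List.pyGetD matrix r []) c 0, 1,
              s.2.2 + (if s.2.1 ≥ 5 then 3 + (s.2.1 - 5) else 0)))
          (PySem.List.pyGetD (PySem.List.pyGetD matrix r []) 0 0, 1, pen)
      st.2.2 + (if st.2.1 ≥ 5 then 3 + (st.2.1 - 5) else 0)) penalty
  -- columns
  let penalty :=
    (PySem.List.pyRange 0 size).foldl (fun pen c =>
      let st :=
        (PySem.List.pyRange 1 size).foldl (fun (s : Int × Int × Int) r =>
          if PySem.List.pyGetD (PySem.List.pyGetD matrix r []) c 0 = s.1 then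
            (s.1, s.2.1 + 1, s.2.2)
          else
            (PySem.List.pyGetD (PySem.List.pyGetD matrix r []) c 0, 1,
              s.2.2 + (if s.2.1 ≥ 5 then 3 + (s.2.1 - 5) else 0)))
          (PySem.List.pyGetD (PySem.List.pyGetD matrix 0 []) c 0, 1, pen)
      st.2.2 + (if st.2.1 ≥ 5 then 3 + (st.2.1 - 5) else 0)) penalty
  penalty

-- ===== PORT B =====
-- B-side helper: the inner `while k < len(seq) and seq[k] == seq[0]` counts the leading run of seq[0]
-- in the tail; pvLeadRun is that count (exact, step for step).
def pvLeadRun (x : Int) : List Int → Nat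
  | [] => 0
  | y :: ys => if y = x then pvLeadRun x ys + 1 else 0

-- B's line_penalty: peel the leading run (length k), add k-2 if k >= 5, continue on seq[k:].
def pvLinePenalty : List Int → Int
  | [] => 0
  | x :: xs =>
    let k : Int := 1 + (pvLeadRun x xs : Int)
    (if k ≥ 5 then k - 2 else 0) + pvLinePenalty (xs.drop (pvLeadRun x xs))
termination_by seq => seq.length
decreasing_by simp [List.length_drop]

def penalty_rule1_alt (matrix : List (List Int)) : Int :=
  let n : Int := PySem.List.len matrix
  let cols :=
    (PySem.List.pyRange 0 n).map (fun c =>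
      (PySem.List.pyRange 0 n).map (fun r =>
        PySem.List.pyGetD (PySem.List.pyGetD matrix r []) c 0))
  (matrix.map (fun row => pvLinePenalty (PySem.List.slice row none (some n)))).sum
    + (cols.map pvLinePenalty).sum

-- ===== PRECONDITION & SPEC =====
-- Pre_ excludes exactly the inputs where Python A raises IndexError: some row shorter than the
-- number of rows (matrix[r][0] / matrix[r][c] with c < len(matrix) out of range).
def Pre_penalty_rule1 (matrix : List (List Int)) : Prop :=
  ∀ row ∈ matrix, matrix.length ≤ row.length
instance (matrix : List (List Int)) : Decidable (Pre_penalty_rule1 matrix) := by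
  unfold Pre_penalty_rule1; infer_instance

def pvWitness_penalty_rule1 : List (List Int) :=
  [[1, 1, 1, 1, 1], [0, 1, 0, 1, 0], [1, 0, 1, 0, 1], [0, 1, 0, 1, 0], [1, 1, 1, 1, 0]]

def Spec_penalty_rule1 (matrix : List (List Int)) (out : Int) : Prop := out = penalty_rule1_alt matrix
instance (matrix : List (List Int)) (out : Int) : Decidable (Spec_penalty_rule1 matrix out) := by
  unfold Spec_penalty_rule1; infer_instance

-- ===== CLAIM (what is proved, stated in full; the proofs are below) =====
def Claim_equal_penalty_rule1 : Prop := ∀ (matrix : List (List Int)), Dom_penalty_rule1 matrix → Pre_penalty_rule1 matrix → Spec_penalty_rule1 matrix (penalty_rule1 matrix)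

-- ===== LEMMAS AND PROOFS =====

-- the per-run contribution (A writes it 3 + (L - 5), B writes it L - 2)
def pvPhi (l : Int) : Int := if l >= 5 then 3 + (l - 5) else 0

-- A's loop step on one scanned value, and the closing of a scan
def pvStep (s : Int × Int × Int) (v : Int) : Int × Int × Int :=
  if v = s.1 then (s.1, s.2.1 + 1, s.2.2)
  else (v, 1, s.2.2 + (if s.2.1 >= 5 then 3 + (s.2.1 - 5) else 0))

def pvWrap (s : Int × Int × Int) : Int := s.2.2 + pvPhi s.2.1

-- A's scan of `rest` from state (c, l, _), with the penalty accumulator factored out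
def pvLineAux (c l : Int) : List Int → Int
  | [] => pvPhi l
  | x :: xs => if x = c then pvLineAux c (l + 1) xs else pvPhi l + pvLineAux x 1 xs

theorem pvLinePenalty_nil : pvLinePenalty [] = 0 := by
  simp [pvLinePenalty.eq_def]

theorem pvLinePenalty_cons (x : Int) (xs : List Int) :
    pvLinePenalty (x :: xs)
      = (if (1 + (pvLeadRun x xs : Int)) >= 5 then (1 + (pvLeadRun x xs : Int)) - 2 else 0)
          + pvLinePenalty (xs.drop (pvLeadRun x xs)) := by
  conv_lhs => rw [pvLinePenalty.eq_def]

theorem pvPhi_eq (k : Int) : (if k >= 5 then k - 2 else 0) = pvPhi k := by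
  unfold pvPhi; split <;> omega

theorem pvScan (rest : List Int) : ∀ c l p : Int,
    pvWrap (rest.foldl pvStep (c, l, p)) = p + pvLineAux c l rest := by
  induction rest with
  | nil => intro c l p; simp [pvWrap, pvLineAux]
  | cons y ys ih =>
    intro c l p
    rw [List.foldl_cons]
    by_cases hy : y = c
    · have hs : pvStep (c, l, p) y = (c, l + 1, p) := by simp [pvStep, hy]
      rw [hs, ih]
      simp [pvLineAux, hy]
    · have hs : pvStep (c, l, p) y = (y, 1, p + pvPhi l) := by
        simp [pvStep, hy, pvPhi]
      rw [hs, ih]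
      have h2 : pvLineAux c l (y :: ys) = pvPhi l + pvLineAux y 1 ys := by
        simp [pvLineAux, hy]
      rw [h2]; ring

theorem pvLineAux_eq (rest : List Int) : ∀ c l : Int,
    pvLineAux c l rest
      = pvPhi (l + (pvLeadRun c rest : Int)) + pvLinePenalty (rest.drop (pvLeadRun c rest)) := by
  induction rest with
  | nil => intro c l; simp [pvLineAux, pvLeadRun, pvLinePenalty_nil]
  | cons y ys ih =>
    intro c l
    by_cases hy : y = c
    · have h1 : pvLeadRun c (y :: ys) = pvLeadRun c ys + 1 := by simp [pvLeadRun, hy]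
      have h2 : pvLineAux c l (y :: ys) = pvLineAux c (l + 1) ys := by simp [pvLineAux, hy]
      rw [h1, h2, ih]
      have h3 : l + ((pvLeadRun c ys + 1 : Nat) : Int) = l + 1 + (pvLeadRun c ys : Int) := by
        push_cast; ring
      rw [List.drop_succ_cons, h3]
    · have h1 : pvLeadRun c (y :: ys) = 0 := by simp [pvLeadRun, hy]
      have h2 : pvLineAux c l (y :: ys) = pvPhi l + pvLineAux y 1 ys := by simp [pvLineAux, hy]
      rw [h1, h2, ih]
      have h3 : l + ((0 : Nat) : Int) = l := by simp
      rw [h3, List.drop_zero, pvLinePenalty_cons, pvPhi_eq]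

theorem pvLineAux_one (x : Int) (xs : List Int) :
    pvLineAux x 1 xs = pvLinePenalty (x :: xs) := by
  rw [pvLineAux_eq, pvLinePenalty_cons, pvPhi_eq]

-- A's whole scan of a nonempty line (head :: tail) from penalty p is p + B's line penalty
theorem pvScan_line (x : Int) (xs : List Int) (p : Int) :
    pvWrap (xs.foldl pvStep (x, 1, p)) = p + pvLinePenalty (x :: xs) := by
  rw [pvScan, pvLineAux_one]

-- indexing a list by range(0, n) for n <= length reproduces take n
theorem pvMapRangeTake (row : List Int) (n : Nat) (h : n ≤ row.length) :
    (PySem.List.pyRange 0 (n : Int)).map (fun c => PySem.List.pyGetD row c 0) = row.take n := by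
  rw [PySem.List.pyRange_one, List.map_map]
  apply List.ext_getElem
  · simp; omega
  · intro i h1 h2
    simp only [List.length_map, List.length_range] at h1
    simp only [List.getElem_map, List.getElem_range, Function.comp_apply, List.getElem_take]
    have hi : i < n := by omega
    have hc : (0 : Int) + (i : Int) = ((i : Nat) : Int) := by omega
    rw [hc, PySem.List.pyGetD_natCast]
    exact List.getD_eq_getElem row 0 (by omega)

-- ===== VERDICT (by name: the statement is the Claim_ definition above) =====
theorem penalty_rule1_spec : Claim_equal_penalty_rule1 := by
  intro matrix _ hpre
  unfold Spec_penalty_rule1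
  by_cases hmat : matrix = []
  · subst hmat
    simp [penalty_rule1, penalty_rule1_alt, PySem.List.len]
  · have hpos : (0 : Int) < (matrix.length : Int) := by
      have := List.length_pos_of_ne_nil hmat
      exact_mod_cast this
    have hb_row : ∀ (pen r : Int),
        ((PySem.List.pyRange 1 (matrix.length : Int)).foldl (fun (s : Int × Int × Int) c =>
            if PySem.List.pyGetD (PySem.List.pyGetD matrix r []) c 0 = s.1 then
              (s.1, s.2.1 + 1, s.2.2)
            else
              (PySem.List.pyGetD (PySem.List.pyGetD matrix r []) c 0, 1,
                s.2.2 + (if s.2.1 >= 5 then 3 + (s.2.1 - 5) else 0)))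
          (PySem.List.pyGetD (PySem.List.pyGetD matrix r []) 0 0, 1, pen)).2.2 +
          (if ((PySem.List.pyRange 1 (matrix.length : Int)).foldl (fun (s : Int × Int × Int) c =>
            if PySem.List.pyGetD (PySem.List.pyGetD matrix r []) c 0 = s.1 then
              (s.1, s.2.1 + 1, s.2.2)
            else
              (PySem.List.pyGetD (PySem.List.pyGetD matrix r []) c 0, 1,
                s.2.2 + (if s.2.1 >= 5 then 3 + (s.2.1 - 5) else 0)))
          (PySem.List.pyGetD (PySem.List.pyGetD matrix r []) 0 0, 1, pen)).2.1 >= 5 then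
            3 + (((PySem.List.pyRange 1 (matrix.length : Int)).foldl (fun (s : Int × Int × Int) c =>
            if PySem.List.pyGetD (PySem.List.pyGetD matrix r []) c 0 = s.1 then
              (s.1, s.2.1 + 1, s.2.2)
            else
              (PySem.List.pyGetD (PySem.List.pyGetD matrix r []) c 0, 1,
                s.2.2 + (if s.2.1 >= 5 then 3 + (s.2.1 - 5) else 0)))
          (PySem.List.pyGetD (PySem.List.pyGetD matrix r []) 0 0, 1, pen)).2.1 - 5) else 0)
        = pen + pvLinePenalty ((PySem.List.pyRange 0 (matrix.length : Int)).map
            (fun c => PySem.List.pyGetD (PySem.List.pyGetD matrix r []) c 0)) := by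
      intro pen r
      show pvWrap ((PySem.List.pyRange 1 (matrix.length : Int)).foldl
          (fun s c => pvStep s (PySem.List.pyGetD (PySem.List.pyGetD matrix r []) c 0))
          (PySem.List.pyGetD (PySem.List.pyGetD matrix r []) 0 0, 1, pen)) = _
      rw [← List.foldl_map, pvScan_line, PySem.List.pyRange_one_cons hpos, List.map_cons]
      norm_num
    have hb_col : ∀ (pen c : Int),
        ((PySem.List.pyRange 1 (matrix.length : Int)).foldl (fun (s : Int × Int × Int) r =>
            if PySem.List.pyGetD (PySem.List.pyGetD matrix r []) c 0 = s.1 then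
              (s.1, s.2.1 + 1, s.2.2)
            else
              (PySem.List.pyGetD (PySem.List.pyGetD matrix r []) c 0, 1,
                s.2.2 + (if s.2.1 >= 5 then 3 + (s.2.1 - 5) else 0)))
          (PySem.List.pyGetD (PySem.List.pyGetD matrix 0 []) c 0, 1, pen)).2.2 +
          (if ((PySem.List.pyRange 1 (matrix.length : Int)).foldl (fun (s : Int × Int × Int) r =>
            if PySem.List.pyGetD (PySem.List.pyGetD matrix r []) c 0 = s.1 then
              (s.1, s.2.1 + 1, s.2.2)
            else
              (PySem.List.pyGetD (PySem.List.pyGetD matrix r []) c 0, 1,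
                s.2.2 + (if s.2.1 >= 5 then 3 + (s.2.1 - 5) else 0)))
          (PySem.List.pyGetD (PySem.List.pyGetD matrix 0 []) c 0, 1, pen)).2.1 >= 5 then
            3 + (((PySem.List.pyRange 1 (matrix.length : Int)).foldl (fun (s : Int × Int × Int) r =>
            if PySem.List.pyGetD (PySem.List.pyGetD matrix r []) c 0 = s.1 then
              (s.1, s.2.1 + 1, s.2.2)
            else
              (PySem.List.pyGetD (PySem.List.pyGetD matrix r []) c 0, 1,
                s.2.2 + (if s.2.1 >= 5 then 3 + (s.2.1 - 5) else 0)))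
          (PySem.List.pyGetD (PySem.List.pyGetD matrix 0 []) c 0, 1, pen)).2.1 - 5) else 0)
        = pen + pvLinePenalty ((PySem.List.pyRange 0 (matrix.length : Int)).map
            (fun r => PySem.List.pyGetD (PySem.List.pyGetD matrix r []) c 0)) := by
      intro pen c
      show pvWrap ((PySem.List.pyRange 1 (matrix.length : Int)).foldl
          (fun s r => pvStep s (PySem.List.pyGetD (PySem.List.pyGetD matrix r []) c 0))
          (PySem.List.pyGetD (PySem.List.pyGetD matrix 0 []) c 0, 1, pen)) = _
      rw [← List.foldl_map, pvScan_line, PySem.List.pyRange_one_cons hpos, List.map_cons]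
      norm_num
    have hrow2 : (PySem.List.pyRange 0 (matrix.length : Int)).map
          (fun r => pvLinePenalty ((PySem.List.pyRange 0 (matrix.length : Int)).map
            (fun c => PySem.List.pyGetD (PySem.List.pyGetD matrix r []) c 0)))
        = (PySem.List.pyRange 0 (matrix.length : Int)).map
          (fun r => pvLinePenalty ((PySem.List.pyGetD matrix r []).take matrix.length)) := by
      apply List.map_congr_left
      intro r hr
      obtain ⟨hr0, hrn⟩ := PySem.List.mem_pyRange_one.mp hr
      have hmem : PySem.List.pyGetD matrix r [] ∈ matrix := by
        apply PySem.List.pyGetD_mem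
        simp [PySem.Raise.InRange]
        omega
      exact congrArg pvLinePenalty (pvMapRangeTake _ _ (hpre _ hmem))
    have hrow3 : (PySem.List.pyRange 0 (matrix.length : Int)).map
          (fun r => pvLinePenalty ((PySem.List.pyGetD matrix r []).take matrix.length))
        = matrix.map (fun row => pvLinePenalty (row.take matrix.length)) := by
      have h := congrArg (List.map (fun row => pvLinePenalty (row.take matrix.length)))
        (PySem.List.map_pyGetD_pyRange_zero matrix [])
      simp only [List.map_map, Function.comp_def, PySem.List.len_eq] at h
      exact h
    simp only [penalty_rule1, penalty_rule1_alt, PySem.List.len_eq,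
      PySem.List.slice_to_natCast]
    simp only [hb_row, hb_col, PySem.List.foldl_add]
    rw [hrow2, hrow3]
    simp only [List.map_map, Function.comp_def]
    ring
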